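-- pv_equiv track=rewrite | github.com/WeirdFoxMillennium/Zadaniya | first_ten_tasks.py | eighth_task
-- ===== SOURCE A (Python) =====
-- from collections import Counter, defaultdict
--
-- def eighth_task(first_num: int, second_num: int, third_num: int):
--     """
--     8. Функция, которая принимает три целочисленных аргумента
--     и возвращает количество целых чисел, имеющих одинаковое значение.
--     :param first_num: первое число
--     :param second_num:  второе число
--     :param third_num: третье число
--     :return: количество одинаковых значений
--     """
--
--     list_nums = [first_num, second_num, third_num]
--
--     counter = defaultdict(int)
--     for num in list_nums:
--         counter[num] += 1
--     if len([True for num in counter.values() if num == 1]) == len((counter.values())):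
--         return 0
--
--     return max(counter.values())
-- ===== SOURCE B (Python) =====
-- def eighth_task(first_num: int, second_num: int, third_num: int):
--     if first_num == second_num == third_num:
--         return 3
--     if first_num == second_num or second_num == third_num or first_num == third_num:
--         return 2
--     return 0
-- ===== Notes on version B (the rewrite author's own statement) =====
-- stated objective: simpler
-- what changed: Replaces the defaultdict frequency table, its all-ones scan and max over values with three direct equality comparisons returning 3/2/0.
import Mathlib
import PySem

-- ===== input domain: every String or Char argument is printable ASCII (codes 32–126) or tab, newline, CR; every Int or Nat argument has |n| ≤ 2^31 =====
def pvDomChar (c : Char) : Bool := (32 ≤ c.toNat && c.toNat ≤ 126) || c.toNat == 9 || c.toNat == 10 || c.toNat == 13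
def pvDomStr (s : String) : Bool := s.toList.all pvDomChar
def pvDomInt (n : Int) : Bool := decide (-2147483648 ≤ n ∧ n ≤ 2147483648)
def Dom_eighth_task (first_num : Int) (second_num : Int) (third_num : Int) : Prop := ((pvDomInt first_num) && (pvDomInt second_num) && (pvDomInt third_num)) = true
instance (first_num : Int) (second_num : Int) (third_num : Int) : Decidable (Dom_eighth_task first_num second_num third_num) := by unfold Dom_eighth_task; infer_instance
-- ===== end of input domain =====

-- ===== PORT A =====
-- Header: B replaces A's defaultdict frequency table and value scan with three direct
-- equality comparisons (objective: simpler); same return value everywhere.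
def eighth_task (first_num : Int) (second_num : Int) (third_num : Int) : Int :=
  let list_nums : List Int := [first_num, second_num, third_num]
  -- counter = defaultdict(int); for num in list_nums: counter[num] += 1
  let counter : PySem.Dict Int Int :=
    list_nums.foldl (fun d num => d.modify num 0 (· + 1)) PySem.Dict.empty
  if ((counter.values.filter (fun num => num == 1)).length : Int) = (counter.values.length : Int) then 0
  else
    -- max(counter.values()); values nonempty here, so max? is some
    (PySem.List.max? counter.values (fun v => v)).getD 0

-- ===== PORT B =====
def eighth_task_alt (first_num : Int) (second_num : Int) (third_num : Int) : Int :=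
  if first_num = second_num ∧ second_num = third_num then 3
  else if first_num = second_num ∨ second_num = third_num ∨ first_num = third_num then 2
  else 0

-- ===== PRECONDITION & SPEC =====
def Spec_eighth_task (first_num : Int) (second_num : Int) (third_num : Int) (out : Int) : Prop := out = eighth_task_alt first_num second_num third_num
instance (first_num : Int) (second_num : Int) (third_num : Int) (out : Int) : Decidable (Spec_eighth_task first_num second_num third_num out) := by unfold Spec_eighth_task; infer_instance

-- ===== CLAIM (what is proved, stated in full; the proofs are below) =====
def Claim_equal_eighth_task : Prop := ∀ (first_num : Int) (second_num : Int) (third_num : Int), Dom_eighth_task first_num second_num third_num → Spec_eighth_task first_num second_num third_num (eighth_task first_num second_num third_num)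

-- ===== LEMMAS AND PROOFS =====

-- ===== VERDICT (by name: the statement is the Claim_ definition above) =====
theorem eighth_task_spec : Claim_equal_eighth_task := by
  intro a b c _
  unfold Spec_eighth_task eighth_task eighth_task_alt
  by_cases h1 : a = b <;> by_cases h2 : b = c <;> by_cases h3 : a = c <;>
    simp_all [PySem.Dict.modify, PySem.Dict.empty, PySem.Dict.getD, PySem.Dict.get?,
      PySem.Dict.insert, PySem.Dict.values, PySem.List.max?,
      PySem.Dict.contains, List.foldl, List.filter]
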